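-- pv_equiv track=rewrite | github.com/AndrewBodmer/LockBox | backend/experimentalEncyption.py | decryptNoKey
-- ===== SOURCE A (Python) =====
-- def decryptNoKey(encrypted_text):
--     length = len(encrypted_text)
--     decrypted_text = list(encrypted_text)
--
--     # Reverse the second transformation
--     for i in range(1, length, 2):
--         temp = decrypted_text[i]
--         decrypted_text[i] = decrypted_text[i-1]
--         decrypted_text[i-1] = temp
--
--     # Reverse the first transformation
--     for i in range(int(length/2)):
--         temp = decrypted_text[i]
--         decrypted_text[i] = decrypted_text[length-1-i]
--         decrypted_text[length-1-i] = temp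
--
--     decrypted_text = ''.join(decrypted_text)
--     decrypted_text_result = ""
--
--     # Reverse the initial encryption transformation
--     i = 3
--     for char in decrypted_text:
--         ascii_value = ord(char)
--         decrypted_ascii_value = ascii_value - i
--         decrypted_text_result += chr(decrypted_ascii_value)
--         i += 1
--
--     return decrypted_text_result
-- ===== SOURCE B (Python) =====
-- def decryptNoKey(encrypted_text):
--     n = len(encrypted_text)
--
--     def src(i):
--         # position in the pair-swapped intermediate string (before the reversal)
--         j = n - 1 - i
--         if j % 2 == 1:
--             return j - 1        # second element of a full pair
--         if j + 1 < n:
--             return j + 1        # first element of a full pair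
--         return j                # lone trailing char of an odd-length string
--
--     return ''.join(chr(ord(encrypted_text[src(i)]) - (3 + i)) for i in range(n))
-- ===== Notes on version B (the rewrite author's own statement) =====
-- stated objective: alternative
-- what changed: Replaces the two in-place swap passes (adjacent-pair swap, then full reversal) plus a string-concatenation loop by a single comprehension that, for each output position, computes the source index under the combined permutation and shifts that character by -(3+i).
import Mathlib
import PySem

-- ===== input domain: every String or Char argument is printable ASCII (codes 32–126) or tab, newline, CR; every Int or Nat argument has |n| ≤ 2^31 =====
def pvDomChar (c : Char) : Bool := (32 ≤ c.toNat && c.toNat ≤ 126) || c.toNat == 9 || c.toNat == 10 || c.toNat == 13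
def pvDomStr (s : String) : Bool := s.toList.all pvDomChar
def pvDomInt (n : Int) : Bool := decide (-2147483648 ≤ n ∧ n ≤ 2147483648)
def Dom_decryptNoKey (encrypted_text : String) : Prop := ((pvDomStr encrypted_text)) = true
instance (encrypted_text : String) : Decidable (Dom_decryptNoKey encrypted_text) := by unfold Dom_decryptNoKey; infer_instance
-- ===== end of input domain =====

-- B replaces the three mutation passes (pair swap, reversal, shift loop) by one map computing
-- each output char from its source index under the combined permutation; objective: alternative.


-- ===== PORT A =====
-- All list index reads are in range (1 ≤ i < length resp. i < length/2), so pyGetD/getD are exact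
-- there; int(length/2) = length/2 exactly for |length| ≤ 2^31; chr(ord(char)-i) is exact under
-- Pre_ (argument in 0..126) — Python raises ValueError outside Pre_; the fold over l2 visits the
-- same chars as Python's loop over ''.join(decrypted_text).
def decryptNoKey (encrypted_text : String) : String :=
  let length := encrypted_text.toList.length
  let decrypted_text := encrypted_text.toList
  -- for i in range(1, length, 2): temp = d[i]; d[i] = d[i-1]; d[i-1] = temp
  let l1 := (PySem.List.pyRange 1 (length : Int) 2).foldl (fun l i =>
    let temp := PySem.List.pyGetD l i ' '
    let l' := l.set i.toNat (PySem.List.pyGetD l (i - 1) ' ')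
    l'.set (i - 1).toNat temp) decrypted_text
  -- for i in range(int(length/2)): temp = d[i]; d[i] = d[length-1-i]; d[length-1-i] = temp
  let l2 := (List.range (length / 2)).foldl (fun l i =>
    let temp := l.getD i ' '
    let l' := l.set i (l.getD (length - 1 - i) ' ')
    l'.set (length - 1 - i) temp) l1
  -- i = 3; for char in decrypted_text: result += chr(ord(char) - i); i += 1
  let r := l2.foldl (fun (st : List Char × Int) c =>
    (st.1 ++ [Char.ofNat ((c.toNat : Int) - st.2).toNat], st.2 + 1)) ([], 3)
  String.ofList r.1

-- ===== PORT B =====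
-- source index in the original string of output position i (string of length n)
def pvSrc (n i : Nat) : Nat :=
  let j := n - 1 - i
  if j % 2 == 1 then j - 1 else if j + 1 < n then j + 1 else j

-- chr(ord(…) - (3+i)) is exact under Pre_, as in port A (B raises exactly where A does).
def decryptNoKey_alt (encrypted_text : String) : String :=
  let cs := encrypted_text.toList
  let n := cs.length
  String.ofList ((List.range n).map (fun i =>
    Char.ofNat (((cs.getD (pvSrc n i) ' ').toNat : Int) - (3 + (i : Int))).toNat))

-- ===== PRECONDITION & SPEC =====
-- Pre_ excludes exactly the inputs on which chr receives a negative argument and Python A raises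
-- ValueError (B raises there too): the char at output position i must have code ≥ 3 + i.
def Pre_decryptNoKey (encrypted_text : String) : Prop :=
  ∀ i ∈ List.range encrypted_text.toList.length,
    3 + i ≤ (encrypted_text.toList.getD (pvSrc encrypted_text.toList.length i) ' ').toNat
instance (encrypted_text : String) : Decidable (Pre_decryptNoKey encrypted_text) := by
  unfold Pre_decryptNoKey; infer_instance
def pvWitness_decryptNoKey : String := "abc"
def Spec_decryptNoKey (encrypted_text : String) (out : String) : Prop := out = decryptNoKey_alt encrypted_text
instance (encrypted_text : String) (out : String) : Decidable (Spec_decryptNoKey encrypted_text out) := by unfold Spec_decryptNoKey; infer_instance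

-- ===== CLAIM (what is proved, stated in full; the proofs are below) =====
def Claim_equal_decryptNoKey : Prop := ∀ (encrypted_text : String), Dom_decryptNoKey encrypted_text → Pre_decryptNoKey encrypted_text → Spec_decryptNoKey encrypted_text (decryptNoKey encrypted_text)

-- ===== LEMMAS AND PROOFS =====

-- the swap both of A's in-place loops perform: temp = l[i]; l[i] = l[j]; l[j] = temp
def pvSwapStep (l : List Char) (i j : Nat) : List Char :=
  (l.set i (l.getD j ' ')).set j (l.getD i ' ')

-- the pair-swap pass, structurally
def pvPairSwap : List Char → List Char
  | a :: b :: t => b :: a :: pvPairSwap t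
  | l => l

theorem pvSwapStep_length (l : List Char) (i j : Nat) : (pvSwapStep l i j).length = l.length := by
  simp [pvSwapStep]

theorem pvPairSwap_length : ∀ l : List Char, (pvPairSwap l).length = l.length
  | [] => rfl
  | [_] => rfl
  | _ :: _ :: t => by simp [pvPairSwap, pvPairSwap_length t]

theorem pvSwapStep_cons2 (x y : Char) (l : List Char) (i j : Nat) :
    pvSwapStep (x :: y :: l) (i + 2) (j + 2) = x :: y :: pvSwapStep l i j := by
  simp [pvSwapStep, show i + 2 = (i + 1) + 1 by ring, show j + 2 = (j + 1) + 1 by ring,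
    List.set_cons_succ]

theorem pvFoldSwap_shift2 (ks : List Nat) (x y : Char) (l : List Char) :
    ks.foldl (fun acc k => pvSwapStep acc (2 * (k + 1) + 1) (2 * (k + 1))) (x :: y :: l)
      = x :: y :: ks.foldl (fun acc k => pvSwapStep acc (2 * k + 1) (2 * k)) l := by
  induction ks generalizing l with
  | nil => rfl
  | cons k ks ih =>
    simp only [List.foldl_cons]
    rw [show 2 * (k + 1) + 1 = (2 * k + 1) + 2 by ring, show 2 * (k + 1) = 2 * k + 2 by ring,
      pvSwapStep_cons2, ih]

theorem pvLoop1_eq_pairSwap : ∀ t : List Char,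
    (List.range (t.length / 2)).foldl (fun l k => pvSwapStep l (2 * k + 1) (2 * k)) t
      = pvPairSwap t
  | [] => rfl
  | [a] => by simp [pvPairSwap]
  | a :: b :: t => by
    have h2 : (a :: b :: t).length / 2 = t.length / 2 + 1 := by simp; omega
    rw [h2, List.range_succ_eq_map, List.foldl_cons, List.foldl_map]
    have h0 : pvSwapStep (a :: b :: t) (2 * 0 + 1) (2 * 0) = b :: a :: t := by
      simp [pvSwapStep]
    rw [h0]
    simp only [Nat.succ_eq_add_one]
    rw [pvFoldSwap_shift2, pvLoop1_eq_pairSwap t]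
    rfl

theorem getElem_pvSwapStep (l : List Char) (i j k : Nat)
    (hi : i < l.length) (hj : j < l.length) (hk : k < l.length) :
    (pvSwapStep l i j)[k]'(by simpa [pvSwapStep] using hk)
      = if k = j then l[i] else if k = i then l[j] else l[k] := by
  simp only [pvSwapStep, List.getElem_set, List.getD_eq_getElem _ _ hj,
    List.getD_eq_getElem _ _ hi]
  split_ifs <;> first | rfl | omega

theorem pvSwapStep_mid (x y : Char) (l : List Char) (i j : Nat)
    (hi : i < l.length) (hj : j < l.length) :
    pvSwapStep (x :: (l ++ [y])) (i + 1) (j + 1) = x :: (pvSwapStep l i j ++ [y]) := by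
  apply List.ext_getElem (by simp [pvSwapStep])
  intro k hk1 hk2
  have hk : k < l.length + 2 := by simp [pvSwapStep] at hk1; omega
  rw [getElem_pvSwapStep _ _ _ _ (by simp; omega) (by simp; omega) (by simp; omega)]
  rcases k with _ | k
  · rw [if_neg (by omega), if_neg (by omega)]
    simp
  · simp only [List.cons_append, List.getElem_cons_succ]
    by_cases hkl : k < l.length
    · rw [List.getElem_append_left (show k < (pvSwapStep l i j).length by
        rw [pvSwapStep_length]; exact hkl), getElem_pvSwapStep _ _ _ _ hi hj hkl,
        List.getElem_append_left hi, List.getElem_append_left hj,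
        List.getElem_append_left hkl]
      split_ifs <;> first | rfl | omega
    · have hkeq : k = l.length := by omega
      subst hkeq
      rw [if_neg (by omega), if_neg (by omega)]
      rw [List.getElem_concat_length rfl, List.getElem_concat_length (pvSwapStep_length l i j).symm]

theorem pvSwapEnds (x y : Char) (l : List Char) :
    pvSwapStep (x :: (l ++ [y])) 0 (l.length + 1) = y :: (l ++ [x]) := by
  apply List.ext_getElem (by simp [pvSwapStep])
  intro k hk1 hk2
  have hk : k < l.length + 2 := by simp [pvSwapStep] at hk1; omega
  rw [getElem_pvSwapStep _ _ _ _ (by simp) (by simp) (by simp; omega)]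
  rcases k with _ | k
  · rw [if_neg (by omega), if_pos rfl]
    simp only [List.cons_append, List.getElem_cons_succ, List.getElem_cons_zero]
    rw [List.getElem_concat_length rfl]
  · simp only [List.cons_append, List.getElem_cons_succ, List.getElem_cons_zero]
    by_cases hkl : k < l.length
    · rw [if_neg (by omega), if_neg (by omega)]
      rw [List.getElem_append_left hkl, List.getElem_append_left hkl]
    · have hkeq : k = l.length := by omega
      subst hkeq
      rw [if_pos (by omega)]
      rw [List.getElem_concat_length rfl]

theorem pvFoldSwap_mid (fi fj : Nat → Nat) :
    ∀ (ks : List Nat) (l : List Char) (x y : Char),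
    (∀ k ∈ ks, fi k < l.length ∧ fj k < l.length) →
    ks.foldl (fun acc k => pvSwapStep acc (fi k + 1) (fj k + 1)) (x :: (l ++ [y]))
      = x :: (ks.foldl (fun acc k => pvSwapStep acc (fi k) (fj k)) l ++ [y])
  | [], _, _, _, _ => rfl
  | k :: ks, l, x, y, hb => by
    simp only [List.foldl_cons]
    rw [pvSwapStep_mid x y l _ _ (hb k (by simp)).1 (hb k (by simp)).2,
      pvFoldSwap_mid fi fj ks _ x y (fun k' hk' => by
        rw [pvSwapStep_length]; exact hb k' (by simp [hk']))]

theorem pvLoop2_eq_reverse : ∀ (n : Nat) (l : List Char), l.length = n →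
    (List.range (n / 2)).foldl (fun acc i => pvSwapStep acc i (n - 1 - i)) l = l.reverse := by
  intro n
  induction n using Nat.strong_induction_on with
  | _ n ih =>
    intro l hl
    match n, l with
    | 0, [] => rfl
    | 1, [a] => rfl
    | (m + 2), (x :: rest) =>
      rcases List.eq_nil_or_concat rest with h | ⟨mid, y, h⟩
      · subst h; simp at hl
      subst h
      simp only [List.concat_eq_append] at hl ⊢
      have hm : mid.length = m := by simp at hl; omega
      have hc : (m + 2) / 2 = mid.length / 2 + 1 := by omega
      rw [hc, List.range_succ_eq_map, List.foldl_cons, List.foldl_map]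
      have h0 := pvSwapEnds x y mid
      rw [show m + 2 - 1 - 0 = mid.length + 1 by omega, h0]
      have hcong : (List.range (mid.length / 2)).foldl
          (fun acc k => pvSwapStep acc (Nat.succ k) (m + 2 - 1 - Nat.succ k)) (y :: (mid ++ [x]))
          = (List.range (mid.length / 2)).foldl
          (fun acc k => pvSwapStep acc (k + 1) ((mid.length - 1 - k) + 1)) (y :: (mid ++ [x])) := by
        apply PySem.List.foldl_congr_mem
        intro acc k hk
        rw [List.mem_range] at hk
        congr 1 <;> omega
      rw [hcong, pvFoldSwap_mid _ _ _ _ _ _ (fun k hk => by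
        rw [List.mem_range] at hk; omega)]
      rw [ih mid.length (by omega) mid rfl]
      simp

theorem pvPairSwap_getD : ∀ (l : List Char) (j : Nat), j < l.length →
    (pvPairSwap l).getD j ' '
      = l.getD (if j % 2 = 1 then j - 1 else if j + 1 < l.length then j + 1 else j) ' '
  | [], j, hj => absurd hj (by simp)
  | [a], j, hj => by
    have hj0 : j = 0 := by simp at hj; omega
    subst hj0
    rw [if_neg (by omega), if_neg (by simp)]
    simp [pvPairSwap]
  | a :: b :: t, 0, _ => by
    rw [if_neg (by omega), if_pos (by simp)]
    simp [pvPairSwap]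
  | a :: b :: t, 1, _ => by
    rw [if_pos (by omega)]
    simp [pvPairSwap]
  | a :: b :: t, j + 2, hj => by
    have hj' : j < t.length := by simp at hj; omega
    have ih := pvPairSwap_getD t j hj'
    have hps : (pvPairSwap (a :: b :: t)).getD (j + 2) ' ' = (pvPairSwap t).getD j ' ' := by
      rw [show j + 2 = (j + 1) + 1 from rfl]
      simp [pvPairSwap]
    rw [hps, ih]
    by_cases hpar : j % 2 = 1
    · rw [if_pos hpar, if_pos (show (j + 2) % 2 = 1 by omega),
        show j + 2 - 1 = ((j - 1) + 1) + 1 by omega]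
      simp
    · by_cases h2 : j + 1 < t.length
      · rw [if_neg hpar, if_neg (show ¬((j + 2) % 2 = 1) by omega), if_pos h2,
          if_pos (show j + 2 + 1 < (a :: b :: t).length by simp; omega),
          show j + 2 + 1 = ((j + 1) + 1) + 1 from rfl]
        simp
      · rw [if_neg hpar, if_neg (show ¬((j + 2) % 2 = 1) by omega), if_neg h2,
          if_neg (show ¬(j + 2 + 1 < (a :: b :: t).length) by simp; omega),
          show j + 2 = (j + 1) + 1 from rfl]
        simp

theorem pvShiftFold : ∀ (l acc : List Char) (k : Int),
    (l.foldl (fun (st : List Char × Int) c =>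
        (st.1 ++ [Char.ofNat ((c.toNat : Int) - st.2).toNat], st.2 + 1)) (acc, k)).1
      = acc ++ (List.range l.length).map
          (fun t => Char.ofNat (((l.getD t ' ').toNat : Int) - (k + (t : Int))).toNat)
  | [], acc, k => by simp
  | c :: l, acc, k => by
    simp only [List.foldl_cons, List.length_cons, List.range_succ_eq_map, List.map_cons,
      List.map_map]
    rw [pvShiftFold l (acc ++ [Char.ofNat ((c.toNat : Int) - k).toNat]) (k + 1)]
    simp only [List.getD_cons_zero, Nat.cast_zero, add_zero, List.append_assoc,
      List.singleton_append]
    congr 2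
    apply List.map_congr_left
    intro t _
    simp only [Function.comp_apply, Nat.succ_eq_add_one, List.getD_cons_succ]
    congr 2
    push_cast
    ring

-- ===== VERDICT (by name: the statement is the Claim_ definition above) =====
theorem decryptNoKey_spec : Claim_equal_decryptNoKey := by
  intro s _hdom _hpre
  unfold Spec_decryptNoKey decryptNoKey decryptNoKey_alt
  simp only []
  -- loop 1 equals the pair swap
  have hrange : PySem.List.pyRange 1 (s.toList.length : Int) 2
      = (List.range (s.toList.length / 2)).map (fun k : Nat => (1 : Int) + 2 * (k : Int)) := by
    rw [PySem.List.pyRange_of_pos _ _ (by norm_num)]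
    have hcount : (if (1 : Int) < (s.toList.length : Int) then
        (((s.toList.length : Int) - 1 + 2 - 1) / 2).toNat else 0) = s.toList.length / 2 := by
      split_ifs with h <;> omega
    rw [hcount]
  rw [hrange, List.foldl_map]
  have hstep : List.foldl (fun (l : List Char) (k : Nat) =>
      (l.set ((1 : Int) + 2 * (k : Int)).toNat
          (PySem.List.pyGetD l ((1 : Int) + 2 * (k : Int) - 1) ' ')).set
        ((1 : Int) + 2 * (k : Int) - 1).toNat
        (PySem.List.pyGetD l ((1 : Int) + 2 * (k : Int)) ' '))
      s.toList (List.range (s.toList.length / 2))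
      = List.foldl (fun l k => pvSwapStep l (2 * k + 1) (2 * k))
        s.toList (List.range (s.toList.length / 2)) := by
    apply PySem.List.foldl_congr_mem
    intro acc k _
    have e1 : ((1 : Int) + 2 * (k : Int)).toNat = 2 * k + 1 := by omega
    have e2 : ((1 : Int) + 2 * (k : Int) - 1).toNat = 2 * k := by omega
    rw [PySem.List.pyGetD_of_nonneg _ _ (by omega),
      PySem.List.pyGetD_of_nonneg _ _ (by omega), e1, e2]
    rfl
  rw [hstep, pvLoop1_eq_pairSwap]
  -- loop 2 equals the reversal
  have hl2 : List.foldl (fun (l : List Char) (i : Nat) =>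
      (l.set i (l.getD (s.toList.length - 1 - i) ' ')).set
        (s.toList.length - 1 - i) (l.getD i ' '))
      (pvPairSwap s.toList) (List.range (s.toList.length / 2))
      = (pvPairSwap s.toList).reverse := by
    have := pvLoop2_eq_reverse s.toList.length (pvPairSwap s.toList) (pvPairSwap_length s.toList)
    simpa [pvSwapStep] using this
  rw [hl2]
  -- the shift loop equals B's indexed map
  rw [pvShiftFold]
  rw [show (pvPairSwap s.toList).reverse.length = s.toList.length by
    simp [pvPairSwap_length]]
  simp only [List.nil_append]
  congr 1
  apply List.map_congr_left
  intro i hi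
  rw [List.mem_range] at hi
  have hrev : (pvPairSwap s.toList).reverse.getD i ' '
      = (pvPairSwap s.toList).getD (s.toList.length - 1 - i) ' ' := by
    rw [List.getD_eq_getElem _ _ (by simp only [List.length_reverse, pvPairSwap_length]; exact hi),
        List.getElem_reverse,
        List.getD_eq_getElem _ _ (by rw [pvPairSwap_length]; omega)]
    congr 1
    rw [pvPairSwap_length]
  rw [hrev, pvPairSwap_getD s.toList (s.toList.length - 1 - i) (by omega)]
  simp only [pvSrc, beq_iff_eq]
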